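-- pv_equiv track=rewrite | github.com/sweeneyde/monoid_homology | generate_minion_by_simple.py | symmetry_breakers
-- ===== SOURCE A (Python) =====
-- from itertools import product, permutations
--
-- def perm_inv(g):
--     ginv = [None] * len(g)
--     for i, x in enumerate(g):
--         ginv[x] = i
--     return ginv
--
-- def act(op, g, flip):
--     n = len(op)
--     for row in op:
--         assert len(row) == n
--     assert len(g) == n
--     ginv = perm_inv(g)
--
--     if flip:
--         return [[ginv[op[gj][gi]] for gj in g] for gi in g]
--     else:
--         return [[ginv[op[gi][gj]] for gj in g] for gi in g]
--
-- def stabilizer(op):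
--     return [(g,e)
--             for g in permutations(range(len(op)))
--             for e in range(2)
--             if act(op, g, e) == op]
--
-- def symmetric_orbit_vectors(ker_op, n):
--     # produce pairs of "acted upon" lists
--     # [(i_0, j_0, v_0), ... (i_n3, j_n3, v_n3)]
--     # that the real list ought to be compared to.
--     for g0, e in stabilizer(ker_op):
--         for rest in permutations(range(len(ker_op), n)):
--             g = g0 + rest
--             if e:
--                 yield g, e, [(gj, gi, gv) for gi in g for gj in g for gv in g]
--             else:
--                 yield g, e, [(gi, gj, gv) for gi in g for gj in g for gv in g]
--
-- def symmetry_breakers(ker_op, n):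
--     n0 = len(ker_op)
--     original_vec = [(i, j, v) for i in range(n) for j in range(n) for v in range(n)]
--     for g, e, new_vec in symmetric_orbit_vectors(ker_op, n):
--         # gop = act(ker_op, g[:n0], e)
--         sub_original = []
--         sub_new = []
--         for x, y in zip(original_vec, new_vec):
--             if x != y:
--                 xi, xj, xv = x
--                 yi, yj, yv = y
--                 if xi < n0 and xj < n0:
--                     assert yi < n0 and yj < n0
--                     assert (ker_op[xi][xj] == xv) == (ker_op[yi][yj] == yv)
--                 else:
--                     sub_original.append(x)
--                     sub_new.append(y)
--         yield g, e, sub_original, sub_new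
-- ===== SOURCE B (Python) =====
-- from itertools import permutations
--
-- def perm_inv(g):
--     ginv = [None] * len(g)
--     for i, x in enumerate(g):
--         ginv[x] = i
--     return ginv
--
-- def act(op, g, flip):
--     n = len(op)
--     for row in op:
--         assert len(row) == n
--     assert len(g) == n
--     ginv = perm_inv(g)
--     if flip:
--         return [[ginv[op[gj][gi]] for gj in g] for gi in g]
--     else:
--         return [[ginv[op[gi][gj]] for gj in g] for gi in g]
--
-- def stabilizer(op):
--     return [(g, e)
--             for g in permutations(range(len(op)))
--             for e in range(2)
--             if act(op, g, e) == op]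
--
-- def symmetry_breakers(ker_op, n):
--     # direct emission: no original_vec/new_vec materialization, no zip;
--     # blocked (i,j) sub-block skipped before the v loop, fixed points precomputed.
--     n0 = len(ker_op)
--     for g0, e in stabilizer(ker_op):
--         for rest in permutations(range(n0, n)):
--             g = g0 + rest
--             fix = [g[t] == t for t in range(n)]
--             sub_original = []
--             sub_new = []
--             for i in range(n):
--                 for j in range(n):
--                     if i < n0 and j < n0:
--                         continue
--                     same_ij = (g[j] == i and g[i] == j) if e else (fix[i] and fix[j])
--                     for v in range(n):
--                         if not (same_ij and fix[v]):
--                             sub_original.append((i, j, v))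
--                             sub_new.append((g[j], g[i], g[v]) if e else (g[i], g[j], g[v]))
--             yield g, e, sub_original, sub_new
-- ===== Notes on version B (the rewrite author's own statement) =====
-- stated objective: alternative
-- what changed: A materializes the full n^3 original_vec and n^3 new_vec per orbit element and zips/compares them pairwise; B never builds either vector: it walks (i,j,v) directly, skips the whole invariant i<n0,j<n0 sub-block before the v loop, and decides 'image differs' from a precomputed fixed-point table of g, emitting the image triple only when it is kept.
import Mathlib
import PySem

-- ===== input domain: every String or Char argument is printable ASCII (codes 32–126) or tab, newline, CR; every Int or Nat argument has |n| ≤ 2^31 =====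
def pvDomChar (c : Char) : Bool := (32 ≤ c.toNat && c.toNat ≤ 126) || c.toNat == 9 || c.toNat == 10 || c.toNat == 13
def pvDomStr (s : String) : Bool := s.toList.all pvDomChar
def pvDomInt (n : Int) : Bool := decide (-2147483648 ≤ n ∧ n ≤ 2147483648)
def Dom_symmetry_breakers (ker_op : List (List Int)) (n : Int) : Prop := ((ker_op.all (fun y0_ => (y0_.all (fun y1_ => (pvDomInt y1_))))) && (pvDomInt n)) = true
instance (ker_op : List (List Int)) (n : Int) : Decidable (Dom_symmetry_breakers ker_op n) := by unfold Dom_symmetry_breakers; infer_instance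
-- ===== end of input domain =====

-- B replaces A's materialize-two-n^3-vectors-and-zip inner pass by direct emission with an
-- early skip of the invariant (i<n0, j<n0) sub-block and a precomputed fixed-point table (objective: alternative).

-- ===== PORT A =====
-- shared helpers (the Python module's perm_inv/act/stabilizer, used verbatim by A and B)
-- xs[i] on an Int index (always in range at every use admitted by Pre_; negative index = from the end)
def pvIdx (l : List Int) (i : Int) : Int := PySem.List.pyGetD l i 0
def pvIdxB (l : List Bool) (i : Int) : Bool := PySem.List.pyGetD l i false
def pvRow (op : List (List Int)) (i : Int) : List Int := PySem.List.pyGetD op i []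
-- itertools.permutations(pool): all k-tuples in Python's order (index sequences in lex order)
def lexPermsAux : Nat → List Int → List (List Int)
  | 0, _ => [[]]
  | k+1, l => (List.range l.length).flatMap
      (fun i => (lexPermsAux k (l.eraseIdx i)).map (fun p => l.getD i 0 :: p))
def lexPerms (l : List Int) : List (List Int) := lexPermsAux l.length l
-- perm_inv: g is always a permutation of range(len g) at its call sites, so every slot is written;
-- 0 stands for Python's never-surviving None placeholder
def perm_inv (g : List Int) : List Int :=
  (PySem.List.enumerate g 0).foldl (fun ginv ix => PySem.List.pySetD ginv ix.2 ix.1)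
    (List.replicate g.length 0)
-- act: the two asserts hold on every input admitted by Pre_ (square op, g a permutation) and are omitted
def act (op : List (List Int)) (g : List Int) (flip : Int) : List (List Int) :=
  let ginv := perm_inv g
  if flip ≠ 0 then
    g.map (fun gi => g.map (fun gj => pvIdx ginv (pvIdx (pvRow op gj) gi)))
  else
    g.map (fun gi => g.map (fun gj => pvIdx ginv (pvIdx (pvRow op gi) gj)))
def stabilizer (op : List (List Int)) : List (List Int × Int) :=
  (lexPerms (PySem.List.pyRange 0 op.length 1)).flatMap
    (fun g => (PySem.List.pyRange 0 2 1).filterMap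
      (fun e => if act op g e = op then some (g, e) else none))

def origVec (n : Int) : List (Int × Int × Int) :=
  (PySem.List.pyRange 0 n 1).flatMap (fun i =>
    (PySem.List.pyRange 0 n 1).flatMap (fun j =>
      (PySem.List.pyRange 0 n 1).map (fun v => (i, j, v))))
def newVec (g : List Int) (e : Int) : List (Int × Int × Int) :=
  if e ≠ 0 then
    g.flatMap (fun gi => g.flatMap (fun gj => g.map (fun gv => (gj, gi, gv))))
  else
    g.flatMap (fun gi => g.flatMap (fun gj => g.map (fun gv => (gi, gj, gv))))
-- A's inner loop over zip(original_vec, new_vec); the two asserts in the blocked branch hold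
-- under Pre_ (they never append) and are omitted
def aLoop (n0 : Int) (ov nv : List (Int × Int × Int)) :
    List (Int × Int × Int) × List (Int × Int × Int) :=
  (ov.zip nv).foldl (fun acc xy =>
    if xy.1 ≠ xy.2 then
      if xy.1.1 < n0 ∧ xy.1.2.1 < n0 then acc
      else (acc.1 ++ [xy.1], acc.2 ++ [xy.2])
    else acc) ([], [])

def symmetry_breakers (ker_op : List (List Int)) (n : Int) : List (List Int × Int × (List (Int × Int × Int)) × (List (Int × Int × Int))) :=
  let n0 : Int := ker_op.length
  let original_vec := origVec n
  (stabilizer ker_op).flatMap (fun ge =>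
    (lexPerms (PySem.List.pyRange n0 n 1)).map (fun rest =>
      let g := ge.1 ++ rest
      let p := aLoop n0 original_vec (newVec g ge.2)
      (g, ge.2, p.1, p.2)))

-- ===== PORT B =====
def bLoop (n0 n : Int) (g : List Int) (e : Int) :
    List (Int × Int × Int) × List (Int × Int × Int) :=
  let fix := (PySem.List.pyRange 0 n 1).map (fun t => pvIdx g t == t)
  (PySem.List.pyRange 0 n 1).foldl (fun acc i =>
    (PySem.List.pyRange 0 n 1).foldl (fun acc j =>
      if i < n0 ∧ j < n0 then acc
      else
        let same_ij := if e ≠ 0 then pvIdx g j == i && pvIdx g i == j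
                       else pvIdxB fix i && pvIdxB fix j
        (PySem.List.pyRange 0 n 1).foldl (fun acc v =>
          if !(same_ij && pvIdxB fix v) then
            (acc.1 ++ [(i, j, v)],
             acc.2 ++ [if e ≠ 0 then (pvIdx g j, pvIdx g i, pvIdx g v)
                       else (pvIdx g i, pvIdx g j, pvIdx g v)])
          else acc) acc) acc) ([], [])

def symmetry_breakers_alt (ker_op : List (List Int)) (n : Int) : List (List Int × Int × (List (Int × Int × Int)) × (List (Int × Int × Int))) :=
  let n0 : Int := ker_op.length
  (stabilizer ker_op).flatMap (fun ge =>
    (lexPerms (PySem.List.pyRange n0 n 1)).map (fun rest =>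
      let g := ge.1 ++ rest
      let p := bLoop n0 n g ge.2
      (g, ge.2, p.1, p.2)))

-- ===== PRECONDITION & SPEC =====
-- Pre_ excludes exactly the inputs on which A raises: non-square ker_op (act's assert raises
-- AssertionError) and entries outside [-len(ker_op), len(ker_op)) (IndexError indexing ginv).
def Pre_symmetry_breakers (ker_op : List (List Int)) (n : Int) : Prop :=
  (∀ row ∈ ker_op, row.length = ker_op.length) ∧
  (∀ row ∈ ker_op, ∀ x ∈ row, -(ker_op.length : Int) ≤ x ∧ x < (ker_op.length : Int))
instance (ker_op : List (List Int)) (n : Int) : Decidable (Pre_symmetry_breakers ker_op n) := by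
  unfold Pre_symmetry_breakers; infer_instance
def pvWitness_symmetry_breakers : List (List Int) × Int := ([[0]], 2)
def Spec_symmetry_breakers (ker_op : List (List Int)) (n : Int) (out : List (List Int × Int × (List (Int × Int × Int)) × (List (Int × Int × Int)))) : Prop := out = symmetry_breakers_alt ker_op n
-- assembled by hand: automatic synthesis of DecidableEq for this nested product times out
def pvDecTup : DecidableEq (List Int × Int × List (Int × Int × Int) × List (Int × Int × Int)) :=
  have d3 : DecidableEq (Int × Int × Int) := inferInstance
  have dl : DecidableEq (List (Int × Int × Int)) := @instDecidableEqList _ d3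
  have dp : DecidableEq (List (Int × Int × Int) × List (Int × Int × Int)) := @instDecidableEqProd _ _ dl dl
  have dp2 : DecidableEq (Int × List (Int × Int × Int) × List (Int × Int × Int)) := @instDecidableEqProd _ _ _ dp
  @instDecidableEqProd _ _ _ dp2
instance (ker_op : List (List Int)) (n : Int) (out : List (List Int × Int × (List (Int × Int × Int)) × (List (Int × Int × Int)))) : Decidable (Spec_symmetry_breakers ker_op n out) := by unfold Spec_symmetry_breakers; exact @instDecidableEqList _ pvDecTup out _

-- ===== CLAIM (what is proved, stated in full; the proofs are below) =====
def Claim_equal_symmetry_breakers : Prop := ∀ (ker_op : List (List Int)) (n : Int), Dom_symmetry_breakers ker_op n → Pre_symmetry_breakers ker_op n → Spec_symmetry_breakers ker_op n (symmetry_breakers ker_op n)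

-- ===== LEMMAS AND PROOFS =====

-- the pointwise image of a triple under g (what new_vec holds at the matching position)
def img (g : List Int) (e : Int) (x : Int × Int × Int) : Int × Int × Int :=
  if e ≠ 0 then (pvIdx g x.2.1, pvIdx g x.1, pvIdx g x.2.2)
  else (pvIdx g x.1, pvIdx g x.2.1, pvIdx g x.2.2)

theorem lexPermsAux_length {k : Nat} {l p : List Int} (hl : l.length = k)
    (hp : p ∈ lexPermsAux k l) : p.length = k := by
  induction k generalizing l p with
  | zero => simp [lexPermsAux] at hp; simp [hp]
  | succ k ih =>
    simp only [lexPermsAux, List.mem_flatMap, List.mem_range, List.mem_map] at hp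
    obtain ⟨i, hi, q, hq, rfl⟩ := hp
    have hi' : i < l.length := hi
    have : (l.eraseIdx i).length = k := by
      rw [List.length_eraseIdx, if_pos hi']; omega
    simp [ih this hq]

theorem lexPerms_length {l p : List Int} (hp : p ∈ lexPerms l) : p.length = l.length :=
  lexPermsAux_length rfl hp

theorem foldl_flatMap {α β γ : Type} (l : List α) (f : α → List β) (g : γ → β → γ) (b : γ) :
    (l.flatMap f).foldl g b = l.foldl (fun acc x => (f x).foldl g acc) b := by
  induction l generalizing b with
  | nil => rfl
  | cons x xs ih => simp [List.flatMap_cons, List.foldl_append, ih]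

theorem self_map_idx (g : List Int) (n : Int) (hg : (g.length : Int) = n) :
    (PySem.List.pyRange 0 n 1).map (fun t => pvIdx g t) = g := by
  subst hg
  rw [PySem.List.pyRange_one]
  apply List.ext_getElem
  · simp
  · intro k h1 h2
    simp only [List.getElem_map, List.getElem_range, pvIdx]
    simp at h1
    rw [show ((0 : Int) + k) = (k : Int) by omega, PySem.List.pyGetD_natCast]
    simp [h1]

theorem newVec_eq_map (g : List Int) (e n : Int) (hg : (g.length : Int) = n) :
    newVec g e = (origVec n).map (img g e) := by
  unfold newVec origVec
  by_cases he : e ≠ 0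
  · simp only [if_pos he]
    conv_lhs => rw [← self_map_idx g n hg]
    simp [List.flatMap_map, List.map_flatMap, List.map_map, Function.comp_def, img, he]
  · simp only [if_neg he]
    conv_lhs => rw [← self_map_idx g n hg]
    simp [List.flatMap_map, List.map_flatMap, List.map_map, Function.comp_def, img, he]

theorem zip_self_map {a b : Type} (l : List a) (f : a → b) :
    l.zip (l.map f) = l.map (fun x => (x, f x)) := by
  induction l with
  | nil => rfl
  | cons x xs ih => simp [ih]

theorem fix_lookup (g : List Int) (n t : Int) (h0 : 0 ≤ t) (h1 : t < n) :
    pvIdxB ((PySem.List.pyRange 0 n 1).map (fun t => pvIdx g t == t)) t = (pvIdx g t == t) := by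
  unfold pvIdxB
  rw [PySem.List.pyGetD_map_pyRange_of_nonneg _ n t false h0 h1]

theorem foldl_of_id {a c : Type} (l : List a) (f : c → a → c) (b : c)
    (h : ∀ acc x, x ∈ l → f acc x = acc) : l.foldl f b = b := by
  induction l generalizing b with
  | nil => rfl
  | cons x xs ih =>
    rw [List.foldl_cons, h b x (List.mem_cons_self)]
    exact ih _ fun acc y hy => h acc y (List.mem_cons_of_mem _ hy)

theorem inner_eq (n0 n : Int) (g : List Int) (e : Int) (hg : (g.length : Int) = n) :
    aLoop n0 (origVec n) (newVec g e) = bLoop n0 n g e := by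
  unfold aLoop bLoop
  rw [newVec_eq_map g e n hg, zip_self_map, List.foldl_map]
  conv_lhs => rw [origVec, foldl_flatMap]
  apply PySem.List.foldl_congr_mem'
  intro i hi acc
  rw [foldl_flatMap]
  apply PySem.List.foldl_congr_mem'
  intro j hj accj
  by_cases hij : i < n0 ∧ j < n0
  · rw [if_pos hij, List.foldl_map]
    apply foldl_of_id
    intro acc' v hv
    simp [hij]
  · rw [if_neg hij, List.foldl_map]
    apply PySem.List.foldl_congr_mem'
    intro v hv accv
    have hiR := (PySem.List.mem_pyRange_one).1 hi
    have hjR := (PySem.List.mem_pyRange_one).1 hj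
    have hvR := (PySem.List.mem_pyRange_one).1 hv
    rw [fix_lookup g n i hiR.1 hiR.2, fix_lookup g n j hjR.1 hjR.2,
        fix_lookup g n v hvR.1 hvR.2]
    by_cases he : e ≠ 0
    · simp only [img, if_pos he, if_neg hij]
      by_cases hx : pvIdx g j = i ∧ pvIdx g i = j ∧ pvIdx g v = v
      · simp [hx.1, hx.2.1, hx.2.2]
      · have hne : ((i, j, v) : Int × Int × Int) ≠ (pvIdx g j, pvIdx g i, pvIdx g v) := by
          simp only [ne_eq, Prod.mk.injEq, not_and]
          intro h1 h2 h3
          exact hx ⟨h1.symm, h2.symm, h3.symm⟩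
        rw [if_pos hne]
        have : (pvIdx g j == i && pvIdx g i == j && (pvIdx g v == v)) = false := by
          rcases not_and_or.1 hx with h | h
          · simp [beq_eq_false_iff_ne.2 h]
          · rcases not_and_or.1 h with h' | h'
            · simp [beq_eq_false_iff_ne.2 h']
            · simp [beq_eq_false_iff_ne.2 h']
        rw [this]
        rfl
    · simp only [img, if_neg he, if_neg hij]
      by_cases hx : pvIdx g i = i ∧ pvIdx g j = j ∧ pvIdx g v = v
      · simp [hx.1, hx.2.1, hx.2.2]
      · have hne : ((i, j, v) : Int × Int × Int) ≠ (pvIdx g i, pvIdx g j, pvIdx g v) := by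
          simp only [ne_eq, Prod.mk.injEq, not_and]
          intro h1 h2 h3
          exact hx ⟨h1.symm, h2.symm, h3.symm⟩
        rw [if_pos hne]
        have : (pvIdx g i == i && pvIdx g j == j && (pvIdx g v == v)) = false := by
          rcases not_and_or.1 hx with h | h
          · simp [beq_eq_false_iff_ne.2 h]
          · rcases not_and_or.1 h with h' | h'
            · simp [beq_eq_false_iff_ne.2 h']
            · simp [beq_eq_false_iff_ne.2 h']
        rw [this]
        rfl

theorem flatMap_congr_mem {a b : Type} {l : List a} {f g : a → List b}
    (h : ∀ x ∈ l, f x = g x) : l.flatMap f = l.flatMap g := by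
  induction l with
  | nil => rfl
  | cons x xs ih =>
    simp only [List.flatMap_cons, h x (List.mem_cons_self), ih fun y hy => h y (List.mem_cons_of_mem _ hy)]

theorem stabilizer_fst_length {op : List (List Int)} {ge : List Int × Int}
    (h : ge ∈ stabilizer op) : ge.1.length = op.length := by
  unfold stabilizer at h
  simp only [List.mem_flatMap, List.mem_filterMap] at h
  obtain ⟨g', hg', e', _, hsome⟩ := h
  split at hsome
  · cases hsome
    have := lexPerms_length hg'
    simpa [PySem.List.length_pyRange_one] using this
  · cases hsome

-- n ≤ n0: every triple of origVec has i, j < n ≤ n0, so A's loop never appends and B's loop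
-- skips every (i, j) pair: both sides are ([], [])
theorem inner_eq_small (n0 n : Int) (g : List Int) (e : Int) (hn : n ≤ n0) :
    aLoop n0 (origVec n) (newVec g e) = bLoop n0 n g e := by
  unfold aLoop bLoop
  have ha : ((origVec n).zip (newVec g e)).foldl (fun acc xy =>
      if xy.1 ≠ xy.2 then
        if xy.1.1 < n0 ∧ xy.1.2.1 < n0 then acc
        else (acc.1 ++ [xy.1], acc.2 ++ [xy.2])
      else acc) (([], []) : List (Int × Int × Int) × List (Int × Int × Int)) = ([], []) := by
    apply foldl_of_id
    intro acc xy hxy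
    have hx : xy.1 ∈ origVec n := (List.of_mem_zip hxy).1
    have hb : xy.1.1 < n0 ∧ xy.1.2.1 < n0 := by
      unfold origVec at hx
      simp only [List.mem_flatMap, List.mem_map] at hx
      obtain ⟨i, hi, j, hj, v, hv, hxe⟩ := hx
      have hiR := (PySem.List.mem_pyRange_one).1 hi
      have hjR := (PySem.List.mem_pyRange_one).1 hj
      rw [← hxe]
      dsimp only
      exact ⟨by omega, by omega⟩
    simp [hb]
  rw [ha]
  symm
  apply foldl_of_id
  intro acc i hi
  apply foldl_of_id
  intro acc' j hj
  have hiR := (PySem.List.mem_pyRange_one).1 hi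
  have hjR := (PySem.List.mem_pyRange_one).1 hj
  rw [if_pos ⟨by omega, by omega⟩]

theorem symmetry_breakers_spec : Claim_equal_symmetry_breakers := by
  intro ker_op n _ hpre
  unfold Spec_symmetry_breakers symmetry_breakers symmetry_breakers_alt
  apply flatMap_congr_mem
  intro ge hge
  apply List.map_congr_left
  intro rest hrest
  have h1 : ge.1.length = ker_op.length := stabilizer_fst_length hge
  have h2 : rest.length = (n - (ker_op.length : Int)).toNat := by
    have := lexPerms_length hrest
    simpa [PySem.List.length_pyRange_one] using this
  by_cases hn : (ker_op.length : Int) ≤ n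
  · have hg : (((ge.1 ++ rest).length : Nat) : Int) = n := by
      rw [List.length_append, h1, h2]
      push_cast
      omega
    have h := inner_eq (ker_op.length : Int) n (ge.1 ++ rest) ge.2 hg
    simp only [h]
  · have h := inner_eq_small (ker_op.length : Int) n (ge.1 ++ rest) ge.2 (by omega)
    simp only [h]
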